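-- pv_equiv track=rewrite | github.com/InowaR/python | lesson4.py | first_coefficient
-- ===== SOURCE A (Python) =====
-- def first_coefficient(polynomial):
--     first = []
--     i = 0
--     while i < len(polynomial):
--         if polynomial[i] == "x":
--             break
--         first.append(polynomial[i])
--         i += 1
--     return first
-- ===== SOURCE B (Python) =====
-- def first_coefficient(polynomial):
--     idx = next((i for i, c in enumerate(polynomial) if c == "x"), len(polynomial))
--     return list(polynomial[:idx])
-- ===== Notes on version B (the rewrite author's own statement) =====
-- stated objective: idiomatic
-- what changed: B locates the first 'x' index (defaulting to len) and returns a single slice, instead of A's index-driven while loop appending elements one by one.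
import Mathlib
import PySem

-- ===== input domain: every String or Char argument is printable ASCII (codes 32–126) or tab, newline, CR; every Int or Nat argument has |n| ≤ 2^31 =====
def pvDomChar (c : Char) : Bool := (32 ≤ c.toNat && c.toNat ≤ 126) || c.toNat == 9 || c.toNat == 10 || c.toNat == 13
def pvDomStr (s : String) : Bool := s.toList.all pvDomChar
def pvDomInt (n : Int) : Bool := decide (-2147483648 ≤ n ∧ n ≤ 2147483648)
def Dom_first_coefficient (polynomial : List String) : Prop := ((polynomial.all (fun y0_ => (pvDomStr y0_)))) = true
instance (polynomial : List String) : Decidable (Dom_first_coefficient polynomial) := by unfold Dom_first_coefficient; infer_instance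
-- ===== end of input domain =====

-- B finds the first 'x' index (default: length) and returns one slice instead of A's append loop; objective: idiomatic.


-- ===== PORT A =====
-- A's while loop over index i: at each step reads polynomial[i], breaks on "x", else appends.
def firstCoeffLoop (first : List String) (rest : List String) : List String :=
  match rest with
  | [] => first
  | c :: rs => if c = "x" then first else firstCoeffLoop (first ++ [c]) rs

def first_coefficient (polynomial : List String) : List String :=
  firstCoeffLoop [] polynomial

-- ===== PORT B =====
-- idx = index of first "x" (or length), then one slice polynomial[:idx].
def first_coefficient_alt (polynomial : List String) : List String :=
  let idx := match polynomial.findIdx? (fun c => c == "x") with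
    | some i => i
    | none => polynomial.length
  polynomial.take idx

-- ===== PRECONDITION & SPEC =====
def Spec_first_coefficient (polynomial : List String) (out : List String) : Prop := out = first_coefficient_alt polynomial
instance (polynomial : List String) (out : List String) : Decidable (Spec_first_coefficient polynomial out) := by unfold Spec_first_coefficient; infer_instance

-- ===== CLAIM (what is proved, stated in full; the proofs are below) =====
def Claim_equal_first_coefficient : Prop := ∀ (polynomial : List String), Dom_first_coefficient polynomial → Spec_first_coefficient polynomial (first_coefficient polynomial)

-- ===== LEMMAS AND PROOFS =====
theorem firstCoeffLoop_eq (rest : List String) : ∀ (acc : List String),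
    firstCoeffLoop acc rest = acc ++ first_coefficient_alt rest := by
  induction rest with
  | nil => intro acc; simp [firstCoeffLoop, first_coefficient_alt]
  | cons c rs ih =>
    intro acc
    by_cases h : c = "x"
    · simp [firstCoeffLoop, first_coefficient_alt, h, List.findIdx?_cons]
    · simp only [firstCoeffLoop, if_neg h, ih]
      simp [first_coefficient_alt, List.findIdx?_cons, h]
      cases hf : rs.findIdx? (fun c => c == "x") <;> simp

-- ===== VERDICT (by name: the statement is the Claim_ definition above) =====
theorem first_coefficient_spec : Claim_equal_first_coefficient := by
  intro p _
  unfold Spec_first_coefficient first_coefficient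
  simpa using firstCoeffLoop_eq p []
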